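-- pv_equiv track=rewrite | github.com/hoangduongngg/Python-Basic | Danh_sach/PY02053_Tinh_can_doi_cua_ma_tran_2.py | Do_chech_lech
-- ===== SOURCE A (Python) =====
-- def Do_chech_lech(a,n):
--     sum_tren = sum_duoi = 0
--     for i in range(0,n):
--         for j in range(0,n-1-i):
--             sum_tren += a[i][j]
--         for k in range(0,i):
--             sum_duoi += a[i][n-1-k]
--     return abs (sum_tren - sum_duoi)
-- ===== SOURCE B (Python) =====
-- def Do_chech_lech(a, n):
--     # Traverse by anti-diagonals: cells with i+j = s lie above the main
--     # anti-diagonal when s < n-1 and below it when s > n-1; accumulate the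
--     # signed diagonal sums in one accumulator and take the absolute value.
--     d = 0
--     for s in range(2 * n - 1):
--         if s == n - 1:
--             continue
--         sign = 1 if s < n - 1 else -1
--         for i in range(max(0, s - n + 1), min(s, n - 1) + 1):
--             d += sign * a[i][s - i]
--     return abs(d)
-- ===== Notes on version B (the rewrite author's own statement) =====
-- stated objective: alternative
-- what changed: B traverses the matrix by anti-diagonals (outer loop over s = i+j with sign +1 below s = n-1 and -1 above, inner loop over the rows that diagonal crosses) into one signed accumulator, instead of A's row-wise traversal with two bound-sliced inner loops and two accumulators.
import Mathlib
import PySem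

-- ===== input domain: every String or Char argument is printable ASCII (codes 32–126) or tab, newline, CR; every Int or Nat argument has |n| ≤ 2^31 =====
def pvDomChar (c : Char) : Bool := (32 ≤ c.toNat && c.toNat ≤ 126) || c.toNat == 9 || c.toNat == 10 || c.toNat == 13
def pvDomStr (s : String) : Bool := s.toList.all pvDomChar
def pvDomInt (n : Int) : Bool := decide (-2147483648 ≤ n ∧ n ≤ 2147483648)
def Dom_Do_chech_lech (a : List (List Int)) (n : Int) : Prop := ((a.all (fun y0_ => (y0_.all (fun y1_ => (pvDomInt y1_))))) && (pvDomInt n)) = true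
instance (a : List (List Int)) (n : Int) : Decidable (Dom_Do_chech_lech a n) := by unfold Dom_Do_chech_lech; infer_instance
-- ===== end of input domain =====

-- B traverses the matrix by anti-diagonals (outer loop over s = i + j, signed by
-- the side of the anti-diagonal, one accumulator) instead of A's row-wise
-- traversal with two bound-sliced inner loops (objective: alternative).


-- ===== PORT A =====
-- a[i][j] is ported as pyGetD with default 0; Pre_ excludes exactly the inputs
-- where Python's indexing raises, so on Pre_ the default is never used.
def Do_chech_lech (a : List (List Int)) (n : Int) : Int :=
  let p := (PySem.List.pyRange 0 n 1).foldl
    (fun (p : Int × Int) i =>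
      ((PySem.List.pyRange 0 (n - 1 - i) 1).foldl
          (fun s j => s + PySem.List.pyGetD (PySem.List.pyGetD a i []) j 0) p.1,
       (PySem.List.pyRange 0 i 1).foldl
          (fun s k => s + PySem.List.pyGetD (PySem.List.pyGetD a i []) (n - 1 - k) 0) p.2))
    (0, 0)
  |p.1 - p.2|

-- ===== PORT B =====
def Do_chech_lech_alt (a : List (List Int)) (n : Int) : Int :=
  let d := (PySem.List.pyRange 0 (2 * n - 1) 1).foldl
    (fun d s =>
      if s = n - 1 then d
      else
        let sign : Int := if s < n - 1 then 1 else -1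
        (PySem.List.pyRange (max 0 (s - n + 1)) (min s (n - 1) + 1) 1).foldl
          (fun d i => d + sign * PySem.List.pyGetD (PySem.List.pyGetD a i []) (s - i) 0) d)
    0
  |d|

-- ===== PRECONDITION & SPEC =====
-- Pre_ excludes exactly the inputs on which Python A raises IndexError: for
-- n > 1 every row 0..n-1 is indexed (row 0 up to column n-2, rows 1..n-1 up to
-- column n-1); for n ≤ 1 no element is ever accessed and A returns 0.
def Pre_Do_chech_lech (a : List (List Int)) (n : Int) : Prop :=
  1 < n → (n ≤ (a.length : Int) ∧
    ∀ i ∈ List.range n.toNat,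
      (if i = 0 then n - 1 else n) ≤ ((a.getD i []).length : Int))
instance (a : List (List Int)) (n : Int) : Decidable (Pre_Do_chech_lech a n) := by
  unfold Pre_Do_chech_lech; infer_instance
def pvWitness_Do_chech_lech : List (List Int) × Int := ([[1, 2], [3, 4]], 2)
def Spec_Do_chech_lech (a : List (List Int)) (n : Int) (out : Int) : Prop := out = Do_chech_lech_alt a n
instance (a : List (List Int)) (n : Int) (out : Int) : Decidable (Spec_Do_chech_lech a n out) := by unfold Spec_Do_chech_lech; infer_instance

-- ===== CLAIM (what is proved, stated in full; the proofs are below) =====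
def Claim_equal_Do_chech_lech : Prop := ∀ (a : List (List Int)) (n : Int), Dom_Do_chech_lech a n → Pre_Do_chech_lech a n → Spec_Do_chech_lech a n (Do_chech_lech a n)

-- ===== LEMMAS AND PROOFS =====

-- per-row sums of A's two inner loops, for an arbitrary cell getter F
def pvRowT (n : Int) (F : Int → Int → Int) (i : Int) : Int :=
  ((PySem.List.pyRange 0 (n - 1 - i) 1).map (F i)).sum
def pvRowD (n : Int) (F : Int → Int → Int) (i : Int) : Int :=
  ((PySem.List.pyRange 0 i 1).map (fun k => F i (n - 1 - k))).sum
-- per-diagonal signed value of B's inner loop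
def pvDiagB (n : Int) (F : Int → Int → Int) (s : Int) : Int :=
  if s = n - 1 then 0
  else ((PySem.List.pyRange (max 0 (s - n + 1)) (min s (n - 1) + 1) 1).map
    (fun i => (if s < n - 1 then (1 : Int) else -1) * F i (s - i))).sum

theorem pv_foldl_add_sum (f : Int → Int) (l : List Int) (s : Int) :
    l.foldl (fun s x => s + f x) s = s + (l.map f).sum := by
  induction l generalizing s with
  | nil => simp
  | cons x t ih => simp [List.foldl, ih]; ring

theorem pv_outerA (F : Int → Int → Int) (n : Int) (l : List Int) (p : Int × Int) :
    l.foldl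
      (fun (p : Int × Int) i =>
        ((PySem.List.pyRange 0 (n - 1 - i) 1).foldl (fun s j => s + F i j) p.1,
         (PySem.List.pyRange 0 i 1).foldl (fun s k => s + F i (n - 1 - k)) p.2)) p
    = (p.1 + (l.map (pvRowT n F)).sum, p.2 + (l.map (pvRowD n F)).sum) := by
  induction l generalizing p with
  | nil => simp
  | cons x t ih =>
    simp only [List.foldl, List.map, List.sum_cons, ih]
    rw [pv_foldl_add_sum, pv_foldl_add_sum]
    simp [pvRowT, pvRowD]; constructor <;> ring

theorem pv_outerB (F : Int → Int → Int) (n : Int) (l : List Int) (d : Int) :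
    l.foldl
      (fun d s =>
        if s = n - 1 then d
        else
          let sign : Int := if s < n - 1 then 1 else -1
          (PySem.List.pyRange (max 0 (s - n + 1)) (min s (n - 1) + 1) 1).foldl
            (fun d i => d + sign * F i (s - i)) d) d
    = d + (l.map (pvDiagB n F)).sum := by
  induction l generalizing d with
  | nil => simp
  | cons x t ih =>
    simp only [List.foldl, List.map, List.sum_cons, pvDiagB]
    by_cases h : x = n - 1
    · rw [if_pos h, if_pos h, ih]; ring
    · rw [if_neg h, if_neg h, ih, pv_foldl_add_sum]; ring

theorem pv_list_finset_sum (g : Nat → Int) (m : Nat) :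
    ((List.range m).map g).sum = ∑ k ∈ Finset.range m, g k := by
  simp [Finset.range, Multiset.range, Finset.sum]

-- sums over pyRange as Finset.range sums with an offset
theorem pv_pyRange_sum (f : Int → Int) (a b : Int) :
    ((PySem.List.pyRange a b 1).map f).sum
      = ∑ k ∈ Finset.range (b - a).toNat, f (a + (k : Int)) := by
  rw [PySem.List.pyRange_one, List.map_map]
  exact pv_list_finset_sum (fun k => f (a + (k : Int))) (b - a).toNat

-- diagonal reindexing of the upper triangle (ℕ level)
theorem pv_key1 (G : Nat → Nat → Int) (m : Nat) :
    ∑ s ∈ Finset.range m, ∑ i ∈ Finset.range (s + 1), G i (s - i)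
      = ∑ i ∈ Finset.range (m + 1), ∑ j ∈ Finset.range (m - i), G i j := by
  rw [Finset.sum_sigma', Finset.sum_sigma']
  refine Finset.sum_nbij' (fun x => ⟨x.2, x.1 - x.2⟩) (fun x => ⟨x.1 + x.2, x.1⟩)
    ?_ ?_ ?_ ?_ ?_
  · rintro ⟨s, i⟩ h
    simp only [Finset.mem_sigma, Finset.mem_range] at h ⊢; omega
  · rintro ⟨i, j⟩ h
    simp only [Finset.mem_sigma, Finset.mem_range] at h ⊢; omega
  · rintro ⟨s, i⟩ h
    simp only [Finset.mem_sigma, Finset.mem_range] at h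
    simp only [Sigma.mk.inj_iff, heq_eq_eq, and_true]; omega
  · rintro ⟨i, j⟩ h
    simp only [Finset.mem_sigma, Finset.mem_range] at h
    simp only [Sigma.mk.inj_iff, heq_eq_eq, true_and]; omega
  · rintro ⟨s, i⟩ h; rfl

-- diagonal reindexing of the lower triangle (ℕ level)
theorem pv_key2 (G : Nat → Nat → Int) (m : Nat) :
    ∑ t ∈ Finset.range (m - 1), ∑ u ∈ Finset.range (m - 1 - t), G (t + 1 + u) (m - 1 - u)
      = ∑ i ∈ Finset.range m, ∑ k ∈ Finset.range i, G i (m - 1 - k) := by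
  rw [Finset.sum_sigma', Finset.sum_sigma']
  refine Finset.sum_nbij' (fun x => ⟨x.1 + 1 + x.2, x.2⟩) (fun x => ⟨x.1 - 1 - x.2, x.2⟩)
    ?_ ?_ ?_ ?_ ?_
  · rintro ⟨t, u⟩ h
    simp only [Finset.mem_sigma, Finset.mem_range] at h ⊢; omega
  · rintro ⟨i, k⟩ h
    simp only [Finset.mem_sigma, Finset.mem_range] at h ⊢; omega
  · rintro ⟨t, u⟩ h
    simp only [Finset.mem_sigma, Finset.mem_range] at h
    simp only [Sigma.mk.inj_iff, heq_eq_eq, and_true]; omega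
  · rintro ⟨i, k⟩ h
    simp only [Finset.mem_sigma, Finset.mem_range] at h
    simp only [Sigma.mk.inj_iff, heq_eq_eq, and_true]; omega
  · rintro ⟨t, u⟩ h; rfl

-- the generic core: A's expression equals B's expression for any getter F
theorem pv_main (F : Int → Int → Int) (n : Int) :
    |(0 + ((PySem.List.pyRange 0 n 1).map (pvRowT n F)).sum)
      - (0 + ((PySem.List.pyRange 0 n 1).map (pvRowD n F)).sum)|
    = |0 + ((PySem.List.pyRange 0 (2 * n - 1) 1).map (pvDiagB n F)).sum| := by
  by_cases hn : n ≤ 0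
  · have h1 : PySem.List.pyRange 0 n 1 = [] := by
      rw [PySem.List.pyRange_one]
      have h0 : (n - 0).toNat = 0 := by omega
      rw [h0]; rfl
    have h2 : PySem.List.pyRange 0 (2 * n - 1) 1 = [] := by
      rw [PySem.List.pyRange_one]
      have h0 : (2 * n - 1 - 0).toNat = 0 := by omega
      rw [h0]; rfl
    simp [h1, h2]
  · rw [not_le] at hn
    set n' := n.toNat with hn'def
    have hn' : ((n' : Int)) = n := Int.toNat_of_nonneg (by omega)
    have hn1 : 1 ≤ n' := by omega
    set G : Nat → Nat → Int := fun i j => F (i : Int) (j : Int) with hG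
    -- T as a ℕ double sum
    have hT : ((PySem.List.pyRange 0 n 1).map (pvRowT n F)).sum
        = ∑ i ∈ Finset.range n', ∑ j ∈ Finset.range (n' - 1 - i), G i j := by
      rw [pv_pyRange_sum]
      have hr : (n - 0).toNat = n' := by omega
      rw [hr]
      refine Finset.sum_congr rfl ?_
      intro i hi
      simp only [Finset.mem_range] at hi
      simp only [zero_add, pvRowT, pv_pyRange_sum]
      have hr2 : (n - 1 - (i : Int) - 0).toNat = n' - 1 - i := by omega
      rw [hr2]
    -- D as a ℕ double sum
    have hD : ((PySem.List.pyRange 0 n 1).map (pvRowD n F)).sum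
        = ∑ i ∈ Finset.range n', ∑ k ∈ Finset.range i, G i (n' - 1 - k) := by
      rw [pv_pyRange_sum]
      have hr : (n - 0).toNat = n' := by omega
      rw [hr]
      refine Finset.sum_congr rfl ?_
      intro i hi
      simp only [Finset.mem_range] at hi
      simp only [zero_add, pvRowD, pv_pyRange_sum]
      have hr2 : ((i : Int) - 0).toNat = i := by omega
      rw [hr2]
      refine Finset.sum_congr rfl ?_
      intro k hk
      simp only [Finset.mem_range] at hk
      have : ((n' - 1 - k : Nat) : Int) = n - 1 - (k : Int) := by omega
      simp only [hG, this]
    -- split B's diagonal sum at s = n - 1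
    have hsplit : PySem.List.pyRange 0 (2 * n - 1) 1
        = PySem.List.pyRange 0 (n - 1) 1 ++ PySem.List.pyRange (n - 1) n 1
            ++ PySem.List.pyRange n (2 * n - 1) 1 := by
      rw [PySem.List.pyRange_one_append 0 (n - 1) (2 * n - 1) (by omega) (by omega),
          PySem.List.pyRange_one_append (n - 1) n (2 * n - 1) (by omega) (by omega)]
      rw [List.append_assoc]
    have hsing : PySem.List.pyRange (n - 1) n 1 = [n - 1] := by
      have h := PySem.List.pyRange_one_singleton (n - 1)
      rw [sub_add_cancel] at h; exact h
    -- the upper part of B's sum equals T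
    have hBu : ((PySem.List.pyRange 0 (n - 1) 1).map (pvDiagB n F)).sum
        = ∑ s ∈ Finset.range (n' - 1), ∑ i ∈ Finset.range (s + 1), G i (s - i) := by
      rw [pv_pyRange_sum]
      have hr : (n - 1 - 0).toNat = n' - 1 := by omega
      rw [hr]
      refine Finset.sum_congr rfl ?_
      intro s hs
      simp only [Finset.mem_range] at hs
      have hne : (0 : Int) + (s : Int) ≠ n - 1 := by omega
      have hlt : (0 : Int) + (s : Int) < n - 1 := by omega
      simp only [pvDiagB, if_neg hne, if_pos hlt, one_mul]
      have hmax : max 0 ((0 : Int) + (s : Int) - n + 1) = 0 := by omega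
      have hmin : min ((0 : Int) + (s : Int)) (n - 1) = (s : Int) := by omega
      rw [hmax, hmin, pv_pyRange_sum]
      have hr2 : ((s : Int) + 1 - 0).toNat = s + 1 := by omega
      rw [hr2]
      refine Finset.sum_congr rfl ?_
      intro i hi
      simp only [Finset.mem_range] at hi
      have : ((s - i : Nat) : Int) = 0 + (s : Int) - (0 + (i : Int)) := by omega
      simp only [hG, this, zero_add]
    -- the lower part of B's sum equals -D
    have hBl : ((PySem.List.pyRange n (2 * n - 1) 1).map (pvDiagB n F)).sum
        = -(∑ t ∈ Finset.range (n' - 1), ∑ u ∈ Finset.range (n' - 1 - t),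
              G (t + 1 + u) (n' - 1 - u)) := by
      rw [pv_pyRange_sum]
      have hr : (2 * n - 1 - n).toNat = n' - 1 := by omega
      rw [hr, ← Finset.sum_neg_distrib]
      refine Finset.sum_congr rfl ?_
      intro t ht
      simp only [Finset.mem_range] at ht
      have hne : n + (t : Int) ≠ n - 1 := by omega
      have hnlt : ¬ (n + (t : Int) < n - 1) := by omega
      simp only [pvDiagB, if_neg hne, if_neg hnlt, neg_mul, one_mul]
      have hmax : max 0 (n + (t : Int) - n + 1) = (t : Int) + 1 := by omega
      have hmin : min (n + (t : Int)) (n - 1) = n - 1 := by omega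
      rw [hmax, hmin, pv_pyRange_sum]
      have hsub : (n - 1 + 1 - ((t : Int) + 1)).toNat = n' - 1 - t := by omega
      rw [hsub, ← Finset.sum_neg_distrib]
      refine Finset.sum_congr rfl ?_
      intro u hu
      simp only [Finset.mem_range] at hu
      have h1 : ((t + 1 + u : Nat) : Int) = (t : Int) + 1 + (u : Int) := by omega
      have h2 : ((n' - 1 - u : Nat) : Int)
          = n + (t : Int) - ((t : Int) + 1 + (u : Int)) := by omega
      simp only [hG, h1, h2]
    -- assemble
    rw [hsplit, List.map_append, List.map_append, List.sum_append, List.sum_append,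
        hsing]
    have hmid : (([n - 1] : List Int).map (pvDiagB n F)).sum = 0 := by
      simp [pvDiagB]
    rw [hmid, hBu, hBl, hT, hD, pv_key1 G (n' - 1), pv_key2 G n']
    have e1 : n' - 1 + 1 = n' := by omega
    rw [e1]
    ring_nf

-- ===== VERDICT (by name: the statement is the Claim_ definition above) =====
theorem Do_chech_lech_spec : Claim_equal_Do_chech_lech := by
  intro a n _ _
  show Do_chech_lech a n = Do_chech_lech_alt a n
  unfold Do_chech_lech Do_chech_lech_alt
  rw [pv_outerA (fun i j => PySem.List.pyGetD (PySem.List.pyGetD a i []) j 0) n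
        (PySem.List.pyRange 0 n 1) (0, 0),
      pv_outerB (fun i j => PySem.List.pyGetD (PySem.List.pyGetD a i []) j 0) n
        (PySem.List.pyRange 0 (2 * n - 1) 1) 0]
  exact pv_main (fun i j => PySem.List.pyGetD (PySem.List.pyGetD a i []) j 0) n
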